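-- pv_equiv track=rewrite | github.com/saleed/LeetCode | 161.py | dp
-- ===== SOURCE A (Python) =====
-- def dp(s,t):
--     dp=[[ float("inf") for _ in range(len(t)+1)] for _ in range(len(s)+1)]
--
--     for i in range(len(s)+1):
--         for j in range(len(t)+1):
--             if i==0 and j==0:
--                 dp[i][j]=0
--             elif i==0:
--                 dp[i][j]=dp[i][j-1]+1
--             elif j==0:
--                 dp[i][j]=dp[i-1][j]+1
--             else:
--                 if s[i-1]==t[j-1]:
--                     dp[i][j]=min(dp[i-1][j]+1,dp[i][j-1]+1,dp[i-1][j-1])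
--                 else:
--                     dp[i][j]=min(dp[i - 1][j] + 1, dp[i][j - 1] + 1, dp[i - 1][j - 1]+1)
--     return dp[-1][-1]==1
-- ===== SOURCE B (Python) =====
-- def dp(s, t):
--     n, m = len(s), len(t)
--     if abs(n - m) > 1:
--         return False
--     if n == m:
--         return sum(1 for a, b in zip(s, t) if a != b) == 1
--     if n > m:
--         s, t = t, s
--     i = 0
--     while i < len(s) and s[i] == t[i]:
--         i += 1
--     return s[i:] == t[i + 1:]
-- ===== Notes on version B (the rewrite author's own statement) =====
-- stated objective: faster
-- what changed: Replaces the full (len(s)+1) x (len(t)+1) Levenshtein DP table with a direct one-edit test: compare lengths, count mismatches when lengths are equal, otherwise skip the common prefix and compare the remaining suffixes.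
import Mathlib
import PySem

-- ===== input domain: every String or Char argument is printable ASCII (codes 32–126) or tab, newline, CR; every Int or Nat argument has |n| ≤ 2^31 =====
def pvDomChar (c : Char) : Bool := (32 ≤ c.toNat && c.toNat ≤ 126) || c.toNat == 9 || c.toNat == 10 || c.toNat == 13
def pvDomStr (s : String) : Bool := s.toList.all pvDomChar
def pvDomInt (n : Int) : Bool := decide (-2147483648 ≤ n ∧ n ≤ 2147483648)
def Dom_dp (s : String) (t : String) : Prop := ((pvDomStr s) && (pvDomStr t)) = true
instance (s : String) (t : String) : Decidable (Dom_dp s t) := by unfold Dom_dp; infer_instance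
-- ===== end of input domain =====

-- B replaces A's full Levenshtein DP table by a one-edit linear scan (length cases + first-mismatch
-- suffix comparison); same Boolean result, measurably faster (O(|s|+|t|) vs O(|s|*|t|)).

-- ===== PORT A =====
def dpGet2 (m : List (List Int)) (i j : Int) : Int :=
  PySem.List.pyGetD (PySem.List.pyGetD m i []) j 0

def dpSet2 (m : List (List Int)) (i j : Int) (v : Int) : List (List Int) :=
  m.set i.toNat ((m.getD i.toNat []).set j.toNat v)

def dpInner (S T : List Char) (i : Int) (m : List (List Int)) (j : Int) : List (List Int) :=
  if i = 0 ∧ j = 0 then dpSet2 m i j 0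
  else if i = 0 then dpSet2 m i j (dpGet2 m i (j-1) + 1)
  else if j = 0 then dpSet2 m i j (dpGet2 m (i-1) j + 1)
  else if PySem.List.pyGet? S (i-1) = PySem.List.pyGet? T (j-1) then
    dpSet2 m i j (min (dpGet2 m (i-1) j + 1) (min (dpGet2 m i (j-1) + 1) (dpGet2 m (i-1) (j-1))))
  else
    dpSet2 m i j (min (dpGet2 m (i-1) j + 1) (min (dpGet2 m i (j-1) + 1) (dpGet2 m (i-1) (j-1) + 1)))

def dp (s : String) (t : String) : Bool :=
  let S := s.toList
  let T := t.toList
  -- float("inf") placeholder constant: every cell is overwritten before it is ever read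
  let init : List (List Int) :=
    (PySem.List.pyRange 0 ((S.length : Int)+1) 1).map
      (fun _ => (PySem.List.pyRange 0 ((T.length : Int)+1) 1).map (fun _ => (4611686018427387904 : Int)))
  let final :=
    (PySem.List.pyRange 0 ((S.length : Int)+1) 1).foldl
      (fun m i => (PySem.List.pyRange 0 ((T.length : Int)+1) 1).foldl (dpInner S T i) m) init
  PySem.List.pyGetD (PySem.List.pyGetD final (-1) []) (-1) 0 == 1

-- ===== PORT B =====
-- the while-loop + suffix comparison of Source B: walk past the common prefix, then s[i:] == t[i+1:]
def oneAway : List Char → List Char → Bool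
  | x :: a, y :: b => if x = y then oneAway a b else (x :: a) == b
  | a, b => a == b.drop 1

def dp_alt (s : String) (t : String) : Bool :=
  let S := s.toList
  let T := t.toList
  let n : Int := S.length
  let m : Int := T.length
  if 1 < (n - m).natAbs then false
  else if n = m then (List.countP (fun p => p.1 != p.2) (S.zip T)) == 1
  else if m < n then oneAway T S
  else oneAway S T

-- ===== PRECONDITION & SPEC =====
def Spec_dp (s : String) (t : String) (out : Bool) : Prop := out = dp_alt s t
instance (s : String) (t : String) (out : Bool) : Decidable (Spec_dp s t out) := by unfold Spec_dp; infer_instance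

-- ===== CLAIM (what is proved, stated in full; the proofs are below) =====
def Claim_equal_dp : Prop := ∀ (s : String) (t : String), Dom_dp s t → Spec_dp s t (dp s t)

-- ===== LEMMAS AND PROOFS =====

def lev : List Char → List Char → Nat
  | [], b => b.length
  | _ :: a, [] => a.length + 1
  | x :: a, y :: b =>
    if x = y then min (lev a (y :: b) + 1) (min (lev (x :: a) b + 1) (lev a b))
    else min (lev a (y :: b) + 1) (min (lev (x :: a) b + 1) (lev a b + 1))
termination_by a b => a.length + b.length
decreasing_by all_goals simp <;> omega

def cnt : List Char → List Char → Nat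
  | x :: a, y :: b => (if x = y then 0 else 1) + cnt a b
  | _, _ => 0

theorem lev_nil_right (a : List Char) : lev a [] = a.length := by
  cases a <;> simp [lev]

theorem lev_eq_zero (a b : List Char) : lev a b = 0 ↔ a = b := by
  induction a generalizing b with
  | nil => cases b <;> simp [lev]
  | cons x a ih =>
    cases b with
    | nil => simp [lev]
    | cons y b =>
      rw [lev]
      split_ifs with hxy
      · subst hxy
        have := ih b
        constructor
        · intro h; have : lev a b = 0 := by omega
          simp [ih b |>.mp this]
        · intro h
          have hab : a = b := by simpa using h
          have : lev a b = 0 := (ih b).mpr hab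
          omega
      · constructor
        · intro h; omega
        · intro h; simp at h; exact absurd h.1 hxy

theorem lev_len_bound (a b : List Char) :
    b.length ≤ a.length + lev a b ∧ a.length ≤ b.length + lev a b := by
  suffices H : ∀ n (a b : List Char), a.length + b.length ≤ n →
      b.length ≤ a.length + lev a b ∧ a.length ≤ b.length + lev a b from
    H (a.length + b.length) a b le_rfl
  intro n
  induction n with
  | zero =>
    intro a b h
    have ha : a = [] := by cases a <;> simp_all
    have hb : b = [] := by cases b <;> simp_all
    subst ha; subst hb; simp [lev]
  | succ n ih =>
    intro a b h
    cases a with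
    | nil => simp [lev]
    | cons x a =>
      cases b with
      | nil => simp [lev_nil_right]
      | cons y b =>
        have h1 := ih a (y :: b) (by simp at h ⊢; omega)
        have h2 := ih (x :: a) b (by simp at h ⊢; omega)
        have h3 := ih a b (by simp at h ⊢; omega)
        rw [lev]
        split_ifs <;> simp at h1 h2 h3 ⊢ <;> omega

theorem lev_comm (a b : List Char) : lev a b = lev b a := by
  suffices H : ∀ n (a b : List Char), a.length + b.length ≤ n → lev a b = lev b a from
    H (a.length + b.length) a b le_rfl
  intro n
  induction n with
  | zero =>
    intro a b h
    have ha : a = [] := by cases a <;> simp_all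
    have hb : b = [] := by cases b <;> simp_all
    subst ha; subst hb; rfl
  | succ n ih =>
    intro a b h
    cases a with
    | nil => simp [lev, lev_nil_right]
    | cons x a =>
      cases b with
      | nil => simp [lev, lev_nil_right]
      | cons y b =>
        have h1 := ih a (y :: b) (by simp at h ⊢; omega)
        have h2 := ih (x :: a) b (by simp at h ⊢; omega)
        have h3 := ih a b (by simp at h ⊢; omega)
        rw [lev, lev]
        split_ifs with p q q
        · rw [h1, h2, h3]; omega
        · exact absurd p.symm q
        · exact absurd q.symm p
        · rw [h1, h2, h3]; omega

theorem cnt_eq_zero (a b : List Char) (h : a.length = b.length) : cnt a b = 0 ↔ a = b := by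
  induction a generalizing b with
  | nil => cases b <;> simp_all [cnt]
  | cons x a ih =>
    cases b with
    | nil => simp at h
    | cons y b =>
      simp at h
      rw [cnt]
      split_ifs with hxy
      · subst hxy; simp [ih b h]
      · simp [hxy]

theorem lev_eq_one_of_len_eq (a b : List Char) (h : a.length = b.length) :
    lev a b = 1 ↔ cnt a b = 1 := by
  induction a generalizing b with
  | nil =>
    cases b with
    | nil => simp [lev, cnt]
    | cons y b => simp at h
  | cons x a ih =>
    cases b with
    | nil => simp at h
    | cons y b =>
      simp at h
      have hp : lev a (y :: b) ≠ 0 := by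
        rw [ne_eq, lev_eq_zero]
        intro he; rw [he] at h; simp at h
      have hq : lev (x :: a) b ≠ 0 := by
        rw [ne_eq, lev_eq_zero]
        intro he; rw [← he] at h; simp at h
      have e1 : lev a b = 1 ↔ cnt a b = 1 := ih b h
      have e0 : lev a b = 0 ↔ cnt a b = 0 := by rw [lev_eq_zero, cnt_eq_zero a b h]
      rw [lev, cnt]
      split_ifs with hxy <;> omega

theorem oneAway_cons_self (c : Char) (a : List Char) : oneAway a (c :: a) = true := by
  induction a generalizing c with
  | nil => simp [oneAway]
  | cons y a ih =>
    rw [oneAway]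
    split_ifs with h
    · subst h; exact ih y
    · simp

theorem lev_eq_one_of_len_succ (a b : List Char) (h : b.length = a.length + 1) :
    lev a b = 1 ↔ oneAway a b = true := by
  induction a generalizing b with
  | nil =>
    cases b with
    | nil => simp at h
    | cons y b =>
      simp at h
      subst h; simp [lev, oneAway]
  | cons x a ih =>
    cases b with
    | nil => simp at h
    | cons y b =>
      simp at h
      have hp : lev a (y :: b) ≠ 0 := by
        rw [ne_eq, lev_eq_zero]
        intro he
        have : a.length = b.length + 1 := by rw [he]; simp
        omega
      have hr : lev a b ≠ 0 := by
        rw [ne_eq, lev_eq_zero]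
        intro he; rw [he] at h; omega
      rw [lev, oneAway]
      split_ifs with hxy
      · subst hxy
        by_cases hq0 : lev (x :: a) b = 0
        · have hb : b = x :: a := ((lev_eq_zero _ _).mp hq0).symm
          subst hb
          simp [oneAway_cons_self]
          omega
        · rw [← ih b h]
          omega
      · have hq : lev (x :: a) b = 0 ↔ x :: a = b := lev_eq_zero _ _
        have hbeq : ((x :: a) == b) = true ↔ x :: a = b := beq_iff_eq
        rw [show (((x :: a) == b : Bool) = true) ↔ lev (x :: a) b = 0 from by rw [hbeq, hq]]
        omega

def Ins (a b : List Char) : Prop := ∃ u c v, a = u ++ v ∧ b = u ++ c :: v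

theorem oneAway_iff_Ins (a b : List Char) (h : b.length = a.length + 1) :
    oneAway a b = true ↔ Ins a b := by
  induction a generalizing b with
  | nil =>
    cases b with
    | nil => simp at h
    | cons y b =>
      simp at h
      subst h
      constructor
      · intro _; exact ⟨[], y, [], rfl, rfl⟩
      · intro _; simp [oneAway]
  | cons x a ih =>
    cases b with
    | nil => simp at h
    | cons y b =>
      simp at h
      rw [oneAway]
      split_ifs with hxy
      · subst hxy
        rw [ih b h]
        constructor
        · rintro ⟨u, c, v, h1, h2⟩
          exact ⟨x :: u, c, v, by simp [h1], by simp [h2]⟩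
        · rintro ⟨u, c, v, h1, h2⟩
          cases u with
          | nil =>
            simp at h1 h2
            exact ⟨[], x, a, rfl, by simp [h2.2, ← h1]⟩
          | cons z u =>
            simp at h1 h2
            exact ⟨u, c, v, h1.2, h2.2⟩
      · constructor
        · intro hb
          have hb' : x :: a = b := by simpa using hb
          exact ⟨[], y, x :: a, rfl, by simp [hb']⟩
        · rintro ⟨u, c, v, h1, h2⟩
          cases u with
          | nil =>
            simp at h1 h2
            subst h1
            simp [← h2.2]
          | cons z u =>
            simp at h1 h2
            exact absurd (h1.1.trans h2.1.symm) hxy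

theorem Ins_reverse (a b : List Char) : Ins a b ↔ Ins a.reverse b.reverse := by
  have H : ∀ (a b : List Char), Ins a b → Ins a.reverse b.reverse := by
    rintro a b ⟨u, c, v, h1, h2⟩
    exact ⟨v.reverse, c, u.reverse, by simp [h1], by simp [h2]⟩
  constructor
  · exact H a b
  · intro h
    simpa using H a.reverse b.reverse h

theorem cnt_append_single (u v : List Char) (x y : Char) (h : u.length = v.length) :
    cnt (u ++ [x]) (v ++ [y]) = cnt u v + (if x = y then 0 else 1) := by
  induction u generalizing v with
  | nil => cases v <;> simp_all [cnt]
  | cons z u ih =>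
    cases v with
    | nil => simp at h
    | cons w v =>
      simp at h
      simp only [List.cons_append, cnt, ih v h]
      omega

theorem cnt_reverse (a b : List Char) (h : a.length = b.length) :
    cnt a.reverse b.reverse = cnt a b := by
  induction a generalizing b with
  | nil => cases b <;> simp_all
  | cons x a ih =>
    cases b with
    | nil => simp at h
    | cons y b =>
      simp at h
      simp only [List.reverse_cons, cnt]
      rw [cnt_append_single _ _ _ _ (by simp [h]), ih b h]
      omega

theorem cnt_eq_countP (a b : List Char) :
    cnt a b = List.countP (fun p => p.1 != p.2) (a.zip b) := by
  induction a generalizing b with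
  | nil => simp [cnt]
  | cons x a ih =>
    cases b with
    | nil => simp [cnt]
    | cons y b =>
      rw [cnt, List.zip_cons_cons, List.countP_cons, ih b]
      by_cases h : x = y
      · simp [h]
      · simp [h]; omega

theorem alt_eq (s t : String) :
    dp_alt s t = decide (lev s.toList.reverse t.toList.reverse = 1) := by
  have hls : s.toList.reverse.length = s.toList.length := by simp
  have hlt : t.toList.reverse.length = t.toList.length := by simp
  rw [dp_alt]
  split_ifs with h1 h2 h3
  · have hb := lev_len_bound s.toList.reverse t.toList.reverse
    rw [hls, hlt] at hb
    symm
    simp only [decide_eq_false_iff_not]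
    omega
  · have hlen : s.toList.length = t.toList.length := by omega
    apply Bool.eq_iff_iff.mpr
    simp only [beq_iff_eq, decide_eq_true_eq]
    rw [← cnt_eq_countP, ← cnt_reverse _ _ hlen,
      ← lev_eq_one_of_len_eq _ _ (by simpa using hlen)]
  · have hlen : s.toList.length = t.toList.length + 1 := by omega
    apply Bool.eq_iff_iff.mpr
    simp only [decide_eq_true_eq]
    rw [lev_comm s.toList.reverse t.toList.reverse,
      lev_eq_one_of_len_succ t.toList.reverse s.toList.reverse (by simpa using hlen),
      oneAway_iff_Ins t.toList.reverse s.toList.reverse (by simpa using hlen),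
      ← Ins_reverse t.toList s.toList,
      ← oneAway_iff_Ins t.toList s.toList hlen]
  · have hlen : t.toList.length = s.toList.length + 1 := by omega
    apply Bool.eq_iff_iff.mpr
    simp only [decide_eq_true_eq]
    rw [lev_eq_one_of_len_succ s.toList.reverse t.toList.reverse (by simpa using hlen),
      oneAway_iff_Ins s.toList.reverse t.toList.reverse (by simpa using hlen),
      ← Ins_reverse s.toList t.toList,
      ← oneAway_iff_Ins s.toList t.toList hlen]

def cellL (S T : List Char) (i j : Nat) : Nat := lev ((S.take i).reverse) ((T.take j).reverse)

theorem cell_z (S T : List Char) (j : Nat) (hj : j ≤ T.length) : cellL S T 0 j = j := by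
  simp [cellL, lev]; omega

theorem cell_s (S T : List Char) (i : Nat) (hi : i ≤ S.length) : cellL S T i 0 = i := by
  simp [cellL, lev_nil_right]; omega

theorem cell_step (S T : List Char) (i j : Nat) (hi : i < S.length) (hj : j < T.length) :
    cellL S T (i+1) (j+1) =
      if S[i] = T[j] then min (cellL S T i (j+1) + 1) (min (cellL S T (i+1) j + 1) (cellL S T i j))
      else min (cellL S T i (j+1) + 1) (min (cellL S T (i+1) j + 1) (cellL S T i j + 1)) := by
  have hs : S.take (i+1) = S.take i ++ [S[i]] := by
    rw [List.take_add_one]; simp [List.getElem?_eq_getElem hi]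
  have ht : T.take (j+1) = T.take j ++ [T[j]] := by
    rw [List.take_add_one]; simp [List.getElem?_eq_getElem hj]
  simp only [cellL, hs, ht, List.reverse_append, List.reverse_singleton, List.singleton_append]
  rw [lev]

def g (m : List (List Int)) (i j : Nat) : Int := (m.getD i []).getD j 0

def ShapeI (m : List (List Int)) (N M : Nat) : Prop :=
  m.length = N + 1 ∧ ∀ k, k < N + 1 → (m.getD k []).length = M + 1

def RowsOK (S T : List Char) (m : List (List Int)) (i : Nat) : Prop :=
  ∀ i' j', i' < i → j' ≤ T.length → g m i' j' = ((cellL S T i' j' : Nat) : Int)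

theorem dpGet2_natCast (m : List (List Int)) (a b : Nat) : dpGet2 m (a : Int) (b : Int) = g m a b := by
  simp [dpGet2, g, PySem.List.pyGetD_natCast]

theorem dpSet2_natCast (m : List (List Int)) (a b : Nat) (v : Int) :
    dpSet2 m (a : Int) (b : Int) v = m.set a ((m.getD a []).set b v) := by
  simp [dpSet2]

theorem g_set_row_ne (m : List (List Int)) (i : Nat) (r : List Int) (i' j' : Nat) (h : i' ≠ i) :
    g (m.set i r) i' j' = g m i' j' := by
  simp [g, List.getD, List.getElem?_set_ne (Ne.symm h)]

theorem g_set_col_ne (m : List (List Int)) (i j : Nat) (v : Int) (j' : Nat)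
    (him : i < m.length) (h : j' ≠ j) :
    g (m.set i ((m.getD i []).set j v)) i j' = g m i j' := by
  simp [g, List.getD, List.getElem?_set_self him, List.getElem?_set_ne (Ne.symm h)]

theorem g_set_self (m : List (List Int)) (i j : Nat) (v : Int)
    (him : i < m.length) (hjm : j < (m.getD i []).length) :
    g (m.set i ((m.getD i []).set j v)) i j = v := by
  have h2 : j < (m[i]?.getD []).length := by simpa [List.getD] using hjm
  simp [g, List.getD, List.getElem?_set_self him, List.getElem?_set_self h2]

theorem set_ok (S T : List Char) (i j : Nat) (v : Int) (hi : i ≤ S.length) (hj : j ≤ T.length)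
    (m : List (List Int)) (hs : ShapeI m S.length T.length)
    (hr : RowsOK S T m i) (hc : ∀ j' < j, g m i j' = ((cellL S T i j' : Nat) : Int)) :
    ShapeI (dpSet2 m (i : Int) (j : Int) v) S.length T.length ∧
    RowsOK S T (dpSet2 m (i : Int) (j : Int) v) i ∧
    (∀ j' < j, g (dpSet2 m (i : Int) (j : Int) v) i j' = ((cellL S T i j' : Nat) : Int)) ∧
    g (dpSet2 m (i : Int) (j : Int) v) i j = v := by
  obtain ⟨hlen, hrow⟩ := hs
  have him : i < m.length := by omega
  have hjm : j < (m.getD i []).length := by rw [hrow i (by omega)]; omega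
  rw [dpSet2_natCast]
  refine ⟨⟨by simpa using hlen, ?_⟩, ?_, ?_, g_set_self m i j v him hjm⟩
  · intro k hk
    by_cases hki : k = i
    · subst hki
      have : (m.set k ((m.getD k []).set j v)).getD k [] = (m.getD k []).set j v := by
        simp [List.getD, List.getElem?_set_self him]
      rw [this]
      simpa using hrow k hk
    · have : (m.set i ((m.getD i []).set j v)).getD k [] = m.getD k [] := by
        simp [List.getD, List.getElem?_set_ne (Ne.symm hki)]
      rw [this]
      exact hrow k hk
  · intro i' j' hi' hj'
    rw [g_set_row_ne m i _ i' j' (by omega)]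
    exact hr i' j' hi' hj'
  · intro j' hj'
    rw [g_set_col_ne m i j v j' him (by omega)]
    exact hc j' hj'

theorem pyGet?_char_at (S : List Char) (i : Nat) (h1 : 1 ≤ i) (h2 : i ≤ S.length) :
    PySem.List.pyGet? S ((i : Int) - 1) = some (S[i-1]'(by omega)) := by
  have : ((i : Int) - 1) = ((i - 1 : Nat) : Int) := by omega
  rw [this]
  simp [PySem.List.pyGet?, PySem.List.pyIdx?, show i - 1 < S.length from by omega]

theorem step_ok (S T : List Char) (i j : Nat) (hi : i ≤ S.length) (hj : j ≤ T.length)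
    (m : List (List Int)) (hs : ShapeI m S.length T.length)
    (hr : RowsOK S T m i) (hc : ∀ j' < j, g m i j' = ((cellL S T i j' : Nat) : Int)) :
    ShapeI (dpInner S T (i : Int) m (j : Int)) S.length T.length ∧
    RowsOK S T (dpInner S T (i : Int) m (j : Int)) i ∧
    (∀ j' ≤ j, g (dpInner S T (i : Int) m (j : Int)) i j' = ((cellL S T i j' : Nat) : Int)) := by
  have key : ∀ v : Int, v = ((cellL S T i j : Nat) : Int) →
      ShapeI (dpSet2 m (i : Int) (j : Int) v) S.length T.length ∧
      RowsOK S T (dpSet2 m (i : Int) (j : Int) v) i ∧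
      (∀ j' ≤ j, g (dpSet2 m (i : Int) (j : Int) v) i j' = ((cellL S T i j' : Nat) : Int)) := by
    intro v hv
    obtain ⟨a, b, c, d⟩ := set_ok S T i j v hi hj m hs hr hc
    refine ⟨a, b, ?_⟩
    intro j' hj'
    rcases Nat.lt_or_ge j' j with h | h
    · exact c j' h
    · have : j' = j := by omega
      subst this
      rw [d, hv]
  rw [dpInner]
  split_ifs with h00 h0 hj0 hch
  · -- i = 0, j = 0
    have hi0 : i = 0 := by exact_mod_cast h00.1
    have hj0 : j = 0 := by exact_mod_cast h00.2
    subst hi0; subst hj0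
    exact key 0 (by rw [cell_z S T 0 (by omega)]; simp)
  · -- i = 0, j ≥ 1
    have hi0 : i = 0 := by exact_mod_cast h0
    have hj1 : 1 ≤ j := by
      rcases Nat.eq_zero_or_pos j with h | h
      · exfalso; apply h00; subst h hi0; simp
      · exact h
    subst hi0
    have hcast : ((j : Int) - 1) = ((j - 1 : Nat) : Int) := by omega
    rw [hcast, dpGet2_natCast]
    apply key
    rw [hc (j-1) (by omega), cell_z S T (j-1) (by omega), cell_z S T j hj]
    omega
  · -- j = 0, i ≥ 1
    have hj00 : j = 0 := by exact_mod_cast hj0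
    have hi1 : 1 ≤ i := by
      rcases Nat.eq_zero_or_pos i with h | h
      · exfalso; apply h00; subst h hj00; simp
      · exact h
    subst hj00
    have hcast : ((i : Int) - 1) = ((i - 1 : Nat) : Int) := by omega
    rw [hcast, dpGet2_natCast]
    apply key
    rw [hr (i-1) 0 (by omega) (by omega), cell_s S T (i-1) (by omega), cell_s S T i hi]
    omega
  all_goals {
    have hi1 : 1 ≤ i := by
      rcases Nat.eq_zero_or_pos i with h | h
      · exact absurd (by exact_mod_cast h : (i : Int) = 0) h0
      · exact h
    have hj1 : 1 ≤ j := by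
      rcases Nat.eq_zero_or_pos j with h | h
      · exact absurd (by exact_mod_cast h : (j : Int) = 0) hj0
      · exact h
    have hci : ((i : Int) - 1) = ((i - 1 : Nat) : Int) := by omega
    have hcj : ((j : Int) - 1) = ((j - 1 : Nat) : Int) := by omega
    have e1 : dpGet2 m ((i : Int) - 1) (j : Int) = ((cellL S T (i-1) j : Nat) : Int) := by
      rw [hci, dpGet2_natCast]; exact hr (i-1) j (by omega) hj
    have e2 : dpGet2 m (i : Int) ((j : Int) - 1) = ((cellL S T i (j-1) : Nat) : Int) := by
      rw [hcj, dpGet2_natCast]; exact hc (j-1) (by omega)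
    have e3 : dpGet2 m ((i : Int) - 1) ((j : Int) - 1) = ((cellL S T (i-1) (j-1) : Nat) : Int) := by
      rw [hci, hcj, dpGet2_natCast]; exact hr (i-1) (j-1) (by omega) (by omega)
    have hstep := cell_step S T (i-1) (j-1) (by omega) (by omega)
    have hii : i - 1 + 1 = i := by omega
    have hjj : j - 1 + 1 = j := by omega
    rw [hii, hjj] at hstep
    rw [e1, e2, e3]
    apply key
    rw [hstep]
    rw [pyGet?_char_at S i hi1 hi, pyGet?_char_at T j hj1 hj] at hch
    first
    | (rw [if_pos (show S[i-1]'(by omega) = T[j-1]'(by omega) from Option.some_inj.mp hch)]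
       push_cast
       omega)
    | (rw [if_neg (show ¬ S[i-1]'(by omega) = T[j-1]'(by omega) from fun he => hch (by rw [he]))]
       push_cast
       omega)
  }

theorem inner_fold (S T : List Char) (i : Nat) (hi : i ≤ S.length) :
    ∀ jm : Nat, jm ≤ T.length + 1 → ∀ m : List (List Int),
    ShapeI m S.length T.length → RowsOK S T m i →
    ShapeI ((PySem.List.pyRange 0 (jm : Int) 1).foldl (dpInner S T (i : Int)) m) S.length T.length ∧
    RowsOK S T ((PySem.List.pyRange 0 (jm : Int) 1).foldl (dpInner S T (i : Int)) m) i ∧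
    (∀ j' < jm, g ((PySem.List.pyRange 0 (jm : Int) 1).foldl (dpInner S T (i : Int)) m) i j'
      = ((cellL S T i j' : Nat) : Int)) := by
  intro jm
  induction jm with
  | zero =>
    intro _ m hs hr
    simp only [Nat.cast_zero, PySem.List.pyRange_one_eq_nil (le_refl 0), List.foldl_nil]
    exact ⟨hs, hr, by omega⟩
  | succ jm ih =>
    intro hjm m hs hr
    have hsplit : PySem.List.pyRange 0 ((jm + 1 : Nat) : Int) 1
        = PySem.List.pyRange 0 (jm : Int) 1 ++ [(jm : Int)] := by
      push_cast
      exact PySem.List.pyRange_one_succ_right (by positivity)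
    rw [hsplit, List.foldl_append]
    obtain ⟨hs', hr', hc'⟩ := ih (by omega) m hs hr
    simp only [List.foldl_cons, List.foldl_nil]
    obtain ⟨a, b, c⟩ := step_ok S T i jm hi (by omega) _ hs' hr' (fun j' hj' => hc' j' hj')
    exact ⟨a, b, fun j' hj' => c j' (by omega)⟩

theorem outer_fold (S T : List Char) :
    ∀ im : Nat, im ≤ S.length + 1 → ∀ m : List (List Int),
    ShapeI m S.length T.length → RowsOK S T m 0 →
    ShapeI ((PySem.List.pyRange 0 (im : Int) 1).foldl
      (fun m i => (PySem.List.pyRange 0 ((T.length : Int) + 1) 1).foldl (dpInner S T i) m) m)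
      S.length T.length ∧
    RowsOK S T ((PySem.List.pyRange 0 (im : Int) 1).foldl
      (fun m i => (PySem.List.pyRange 0 ((T.length : Int) + 1) 1).foldl (dpInner S T i) m) m) im := by
  intro im
  induction im with
  | zero =>
    intro _ m hs hr
    simp only [Nat.cast_zero, PySem.List.pyRange_one_eq_nil (le_refl 0), List.foldl_nil]
    exact ⟨hs, hr⟩
  | succ im ih =>
    intro him m hs hr
    have hsplit : PySem.List.pyRange 0 ((im + 1 : Nat) : Int) 1
        = PySem.List.pyRange 0 (im : Int) 1 ++ [(im : Int)] := by
      push_cast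
      exact PySem.List.pyRange_one_succ_right (by positivity)
    rw [hsplit, List.foldl_append]
    obtain ⟨hs', hr'⟩ := ih (by omega) m hs hr
    simp only [List.foldl_cons, List.foldl_nil]
    have hcast : ((T.length : Int) + 1) = ((T.length + 1 : Nat) : Int) := by push_cast; ring
    rw [hcast]
    obtain ⟨a, b, c⟩ := inner_fold S T im (by omega) (T.length + 1) (le_refl _) _ hs' hr'
    refine ⟨a, ?_⟩
    intro i' j' hi' hj'
    rcases Nat.lt_or_ge i' im with h | h
    · exact b i' j' h hj'
    · have : i' = im := by omega
      subst this
      exact c j' (by omega)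

theorem dp_eq_lev (s t : String) :
    dp s t = decide (lev s.toList.reverse t.toList.reverse = 1) := by
  rw [dp]
  set S := s.toList with hS
  set T := t.toList with hT
  set row : List Int := (PySem.List.pyRange 0 ((T.length : Int)+1) 1).map (fun _ => (4611686018427387904 : Int)) with hrowdef
  set init : List (List Int) := (PySem.List.pyRange 0 ((S.length : Int)+1) 1).map (fun _ => row) with hinit
  have hrowlen : row.length = T.length + 1 := by
    simp [hrowdef, PySem.List.length_pyRange_one]
  have hinitlen : init.length = S.length + 1 := by
    simp [hinit, PySem.List.length_pyRange_one]
  have hsinit : ShapeI init S.length T.length := by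
    refine ⟨hinitlen, ?_⟩
    intro k hk
    have : init.getD k [] = row := by
      rw [hinit, List.map_const', List.getD_replicate]
      simp [PySem.List.length_pyRange_one]
      omega
    rw [this, hrowlen]
  have hrinit : RowsOK S T init 0 := by intro i' j' h; omega
  have hcast : ((S.length : Int) + 1) = ((S.length + 1 : Nat) : Int) := by push_cast; ring
  rw [hcast]
  obtain ⟨⟨hflen, hfrow⟩, hfok⟩ := outer_fold S T (S.length + 1) (le_refl _) init hsinit hrinit
  set final := (PySem.List.pyRange 0 ((S.length + 1 : Nat) : Int) 1).foldl
      (fun m i => (PySem.List.pyRange 0 ((T.length : Int) + 1) 1).foldl (dpInner S T i) m) init with hfinal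
  have hg : g final S.length T.length = ((cellL S T S.length T.length : Nat) : Int) :=
    hfok S.length T.length (by omega) (by omega)
  have houter : PySem.List.pyGetD final (-1) [] = final.getD S.length [] := by
    simp [PySem.List.pyGetD, PySem.List.pyGet?, PySem.List.pyIdx?, hflen, List.getD]
  have hinner : PySem.List.pyGetD (final.getD S.length []) (-1) 0
      = (final.getD S.length []).getD T.length 0 := by
    have hl : (final.getD S.length []).length = T.length + 1 := hfrow S.length (by omega)
    have hl' : (final[S.length]?.getD []).length = T.length + 1 := by simpa [List.getD] using hl
    simp [PySem.List.pyGetD, PySem.List.pyGet?, PySem.List.pyIdx?, List.getD, hl']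
  rw [houter, hinner]
  have : (final.getD S.length []).getD T.length 0 = ((cellL S T S.length T.length : Nat) : Int) := hg
  rw [this]
  have hcell : cellL S T S.length T.length = lev S.reverse T.reverse := by
    simp [cellL]
  rw [hcell]
  apply Bool.eq_iff_iff.mpr
  simp only [beq_iff_eq, decide_eq_true_eq]
  exact_mod_cast Iff.rfl

-- ===== VERDICT (by name: the statement is the Claim_ definition above) =====
theorem dp_spec : Claim_equal_dp := by
  intro s t _
  show dp s t = dp_alt s t
  rw [dp_eq_lev, alt_eq]
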